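-- pv_equiv track=rewrite | github.com/Wilfrid17/tupla | exercicio4.py | econtra_produto_min_max
-- ===== SOURCE A (Python) =====
-- def econtra_produto_min_max(lista_produtos):
--     produto_min = produto_max = lista_produtos[0]
--
--     for produto in lista_produtos[1:]:
--         if produto[1] < produto_min[1]:
--             produto_min = produto
--         if produto[1] > produto_max[1]:
--             produto_max = produto
--     return produto_min , produto_max
-- ===== SOURCE B (Python) =====
-- def econtra_produto_min_max(lista_produtos):
--     crescente = sorted(lista_produtos, key=lambda p: p[1])
--     decrescente = sorted(lista_produtos, key=lambda p: p[1], reverse=True)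
--     return crescente[0], decrescente[0]
-- ===== Notes on version B (the rewrite author's own statement) =====
-- stated objective: alternative
-- what changed: Replaces the single accumulator scan with two stable sorts by price (ascending and descending) and takes the head of each; stability makes each head the first occurrence of the extremal price, matching A's strict comparisons.
import Mathlib
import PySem

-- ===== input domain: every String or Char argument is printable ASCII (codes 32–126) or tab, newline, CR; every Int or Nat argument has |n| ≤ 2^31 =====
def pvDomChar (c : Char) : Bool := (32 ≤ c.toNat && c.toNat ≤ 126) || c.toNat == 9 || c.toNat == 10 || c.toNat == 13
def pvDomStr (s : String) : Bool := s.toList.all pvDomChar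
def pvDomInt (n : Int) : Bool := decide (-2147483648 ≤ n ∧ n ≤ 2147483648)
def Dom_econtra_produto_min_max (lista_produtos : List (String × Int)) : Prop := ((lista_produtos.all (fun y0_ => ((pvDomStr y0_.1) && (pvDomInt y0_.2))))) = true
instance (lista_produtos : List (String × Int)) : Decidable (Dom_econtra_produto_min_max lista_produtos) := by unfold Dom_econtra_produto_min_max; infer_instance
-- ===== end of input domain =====

-- B replaces A's single accumulator scan with two stable sorts by price (head of each is the extremal
-- product); alternative algorithm, same return value.

-- ===== PORT A =====
-- A: seed both accumulators with lista[0], then one loop over lista[1:] with two strict comparisons.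
def econtra_produto_min_max (lista_produtos : List (String × Int)) : (String × Int) × (String × Int) :=
  match PySem.List.pyGet? lista_produtos 0 with
  | none => ((("", 0)), (("", 0)))   -- unreachable under Pre_ (Python raises IndexError on [])
  | some p0 =>
    let st := (PySem.List.slice lista_produtos (some 1) none).foldl
      (fun (st : (String × Int) × (String × Int)) produto =>
        let produto_min := if produto.2 < st.1.2 then produto else st.1
        let produto_max := if produto.2 > st.2.2 then produto else st.2
        (produto_min, produto_max)) (p0, p0)
    (st.1, st.2)

-- ===== PORT B =====
-- B: sort ascending and descending by price (Python's stable sorted with reverse rule), take the heads.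
def econtra_produto_min_max_alt (lista_produtos : List (String × Int)) : (String × Int) × (String × Int) :=
  let crescente := PySem.List.sorted lista_produtos (fun p => p.2) false
  let decrescente := PySem.List.sorted lista_produtos (fun p => p.2) true
  match PySem.List.pyGet? crescente 0, PySem.List.pyGet? decrescente 0 with
  | some mn, some mx => (mn, mx)
  | _, _ => ((("", 0)), (("", 0)))   -- unreachable under Pre_ (Python raises IndexError on [])

-- ===== PRECONDITION & SPEC =====
-- Pre_ excludes only the empty list, on which both A and B raise IndexError.
def Pre_econtra_produto_min_max (lista_produtos : List (String × Int)) : Prop := lista_produtos ≠ []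
instance (lista_produtos : List (String × Int)) : Decidable (Pre_econtra_produto_min_max lista_produtos) := by unfold Pre_econtra_produto_min_max; infer_instance
def pvWitness_econtra_produto_min_max : (List (String × Int)) := [("a", 3), ("b", 1), ("c", 5)]

def Spec_econtra_produto_min_max (lista_produtos : List (String × Int)) (out : (String × Int) × (String × Int)) : Prop := out = econtra_produto_min_max_alt lista_produtos
instance (lista_produtos : List (String × Int)) (out : (String × Int) × (String × Int)) : Decidable (Spec_econtra_produto_min_max lista_produtos out) := by unfold Spec_econtra_produto_min_max; infer_instance

-- ===== CLAIM =====
def Claim_equal_econtra_produto_min_max : Prop := ∀ (lista_produtos : List (String × Int)), Dom_econtra_produto_min_max lista_produtos → Pre_econtra_produto_min_max lista_produtos → Spec_econtra_produto_min_max lista_produtos (econtra_produto_min_max lista_produtos)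

-- ===== LEMMAS AND PROOFS =====

-- A's paired fold splits into the two independent accumulator folds.
theorem pv_fold_split (t : List (String × Int)) (a b : String × Int) :
    t.foldl (fun (st : (String × Int) × (String × Int)) produto =>
        let produto_min := if produto.2 < st.1.2 then produto else st.1
        let produto_max := if produto.2 > st.2.2 then produto else st.2
        (produto_min, produto_max)) (a, b)
    = (t.foldl (fun m p => if p.2 < m.2 then p else m) a,
       t.foldl (fun m p => if p.2 > m.2 then p else m) b) := by
  induction t generalizing a b with
  | nil => rfl
  | cons x t ih => simp only [List.foldl]; exact ih _ _

-- The head of the insertion-sort fold, once the accumulator is nonempty, is the running extremum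
-- under the insertion predicate.
theorem pv_head_foldl_insertBy (bef : (String × Int) → (String × Int) → Bool)
    (t : List (String × Int)) (a : String × Int) (r : List (String × Int)) :
    (t.foldl (fun acc x => PySem.List.insertBy bef x acc) (a :: r)).head?
    = some (t.foldl (fun m p => if bef p m then p else m) a) := by
  induction t generalizing a r with
  | nil => rfl
  | cons x t ih =>
    simp only [List.foldl, PySem.List.insertBy]
    by_cases h : bef x a <;> simp [h, ih]

-- head of sorted ascending on a nonempty list = A's running-min fold.
theorem pv_sorted_head (x : String × Int) (t : List (String × Int)) :
    (PySem.List.sorted (x :: t) (fun p => p.2) false).head?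
    = some (t.foldl (fun m p => if p.2 < m.2 then p else m) x) := by
  rw [PySem.List.sorted_eq_foldl_insertBy]
  simp only [List.foldl, PySem.List.insertBy]
  rw [pv_head_foldl_insertBy]
  congr 1
  apply List.foldl_ext
  intro m p _
  by_cases h : p.2 < m.2 <;> simp [h]

-- head of sorted descending on a nonempty list = A's running-max fold.
theorem pv_sorted_rev_head (x : String × Int) (t : List (String × Int)) :
    (PySem.List.sorted (x :: t) (fun p => p.2) true).head?
    = some (t.foldl (fun m p => if p.2 > m.2 then p else m) x) := by
  rw [PySem.List.sorted_rev_eq_foldl_insertBy]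
  simp only [List.foldl, PySem.List.insertBy]
  rw [pv_head_foldl_insertBy]
  congr 1
  apply List.foldl_ext
  intro m p _
  by_cases h : m.2 < p.2 <;> simp [h, gt_iff_lt]

-- ===== VERDICT =====
theorem econtra_produto_min_max_spec : Claim_equal_econtra_produto_min_max := by
  intro l _ hpre
  obtain ⟨x, t, rfl⟩ : ∃ x t, l = x :: t := by
    cases l with
    | nil => exact absurd rfl hpre
    | cons x t => exact ⟨x, t, rfl⟩
  unfold Spec_econtra_produto_min_max econtra_produto_min_max econtra_produto_min_max_alt
  obtain ⟨ma, ra, haeq⟩ : ∃ m r, PySem.List.sorted (x :: t) (fun p : String × Int => p.2) false = m :: r := by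
    rcases h : PySem.List.sorted (x :: t) (fun p : String × Int => p.2) false with _ | ⟨m, r⟩
    · exact absurd ((PySem.List.sorted_eq_nil_iff _ _ _).mp h) (by simp)
    · exact ⟨m, r, rfl⟩
  obtain ⟨mb, rb, hbeq⟩ : ∃ m r, PySem.List.sorted (x :: t) (fun p : String × Int => p.2) true = m :: r := by
    rcases h : PySem.List.sorted (x :: t) (fun p : String × Int => p.2) true with _ | ⟨m, r⟩
    · exact absurd ((PySem.List.sorted_eq_nil_iff _ _ _).mp h) (by simp)
    · exact ⟨m, r, rfl⟩
  have ha := pv_sorted_head x t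
  have hb := pv_sorted_rev_head x t
  rw [haeq] at ha
  rw [hbeq] at hb
  simp only [List.head?, Option.some.injEq] at ha hb
  simp [haeq, hbeq, PySem.List.pyGet?, PySem.List.pyIdx?, PySem.List.slice_from_one,
    pv_fold_split, ha, hb, gt_iff_lt]
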